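-- pv_equiv track=rewrite | github.com/holbizmetrics/prime-alphabet-finder | prime_encoder_extended.py | hindi_number_word
-- ===== SOURCE A (Python) =====
-- def hindi_number_word(n: int) -> str:
--     """Hindi number words (transliterated)."""
--     if n == 0: return "shunya"
--     # Hindi has unique words for 1-99
--     words = {
--         1: "ek", 2: "do", 3: "teen", 4: "char", 5: "paanch",
--         6: "chhah", 7: "saat", 8: "aath", 9: "nau", 10: "das",
--         11: "gyarah", 12: "barah", 13: "terah", 14: "chaudah", 15: "pandrah",
--         16: "solah", 17: "satrah", 18: "athaarah", 19: "unnis", 20: "bees",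
--         21: "ikkis", 22: "baais", 23: "teis", 24: "chaubis", 25: "pachchis",
--         26: "chhabbis", 27: "sattais", 28: "atthaais", 29: "untis", 30: "tees",
--         31: "ikatees", 32: "battis", 33: "tentis", 34: "chautis", 35: "paintis",
--         36: "chhattis", 37: "saintis", 38: "adtis", 39: "untalis", 40: "chalis",
--         41: "iktalis", 42: "bayalis", 43: "tentalis", 44: "chavalis", 45: "paintalis",
--         46: "chhiyalis", 47: "saintalis", 48: "adtalis", 49: "unchaas", 50: "pachaas",
--         51: "ikyavan", 52: "baavan", 53: "tirpan", 54: "chauvan", 55: "pachpan",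
--         56: "chhappan", 57: "sattavan", 58: "athavan", 59: "unsath", 60: "saath",
--         61: "iksath", 62: "basath", 63: "tirsath", 64: "chausath", 65: "painsath",
--         66: "chhiyasath", 67: "sarsath", 68: "adsath", 69: "unhattar", 70: "sattar",
--         71: "ikattar", 72: "bahattar", 73: "tihattar", 74: "chauhattar", 75: "pachattar",
--         76: "chhihattar", 77: "satattar", 78: "athhattar", 79: "unasi", 80: "assi",
--         81: "ikasi", 82: "bayasi", 83: "tirasi", 84: "chaurasi", 85: "pachaasi",
--         86: "chhiyasi", 87: "sattasi", 88: "athasi", 89: "navasi", 90: "nabbe",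
--         91: "ikyaanave", 92: "baanave", 93: "tiranave", 94: "chauranave", 95: "pachanave",
--         96: "chhiyanave", 97: "sattanave", 98: "atthanave", 99: "ninyanave"
--     }
--     if n in words: return words[n]
--     elif n < 1000:
--         if n == 100: return "sau"
--         prefix = words.get(n // 100, str(n // 100)) + " sau"
--         return prefix + (" " + hindi_number_word(n % 100) if n % 100 else "")
--     elif n < 100000:
--         if n // 1000 == 1: prefix = "hazaar"
--         else: prefix = hindi_number_word(n // 1000) + " hazaar"
--         return prefix + (" " + hindi_number_word(n % 1000) if n % 1000 else "")
--     return str(n)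
-- ===== SOURCE B (Python) =====
-- _WORDS = ("ek do teen char paanch chhah saat aath nau das "
--           "gyarah barah terah chaudah pandrah solah satrah athaarah unnis bees "
--           "ikkis baais teis chaubis pachchis chhabbis sattais atthaais untis tees "
--           "ikatees battis tentis chautis paintis chhattis saintis adtis untalis chalis "
--           "iktalis bayalis tentalis chavalis paintalis chhiyalis saintalis adtalis unchaas pachaas "
--           "ikyavan baavan tirpan chauvan pachpan chhappan sattavan athavan unsath saath "
--           "iksath basath tirsath chausath painsath chhiyasath sarsath adsath unhattar sattar "
--           "ikattar bahattar tihattar chauhattar pachattar chhihattar satattar athhattar unasi assi "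
--           "ikasi bayasi tirasi chaurasi pachaasi chhiyasi sattasi athasi navasi nabbe "
--           "ikyaanave baanave tiranave chauranave pachanave chhiyanave sattanave atthanave ninyanave").split()
--
--
-- def _w(k):
--     """Word for 1 <= k <= 99, from the 0-indexed split table."""
--     return _WORDS[k - 1]
--
--
-- def _sub_thousand(g):
--     """Words for a group 1..999 (exactly 100 is the bare 'sau')."""
--     if g == 100:
--         return "sau"
--     hundreds, tail = divmod(g, 100)
--     parts = []
--     if hundreds:
--         parts.append(_w(hundreds) + " sau")
--     if tail:
--         parts.append(_w(tail))
--     return " ".join(parts)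
--
--
-- def hindi_number_word(n: int) -> str:
--     """Hindi number words (transliterated)."""
--     if n == 0:
--         return "shunya"
--     if n < 0 or n >= 100000:
--         return str(n)
--     thousands, rest = divmod(n, 1000)
--     parts = []
--     if thousands:
--         parts.append("hazaar" if thousands == 1 else _w(thousands) + " hazaar")
--     if rest:
--         parts.append(_sub_thousand(rest))
--     return " ".join(parts)
-- ===== Notes on version B (the rewrite author's own statement) =====
-- stated objective: alternative
-- what changed: Replaced the self-recursive dict-driven formatter by a flat place-value builder over a different data structure: the 1-99 words live in a 0-indexed list obtained by splitting one space-separated string (indexed lookup, no dict), the number is split once with divmod into thousands/rest and hundreds/tens-units, and the non-empty fragments are ' '.joined; no recursion and no dict-membership fall-through chain.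
-- outside the precondition, e.g. on hindi_number_word(-5): A returns '-1 sau pachanave', B returns '-5'
import Mathlib
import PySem

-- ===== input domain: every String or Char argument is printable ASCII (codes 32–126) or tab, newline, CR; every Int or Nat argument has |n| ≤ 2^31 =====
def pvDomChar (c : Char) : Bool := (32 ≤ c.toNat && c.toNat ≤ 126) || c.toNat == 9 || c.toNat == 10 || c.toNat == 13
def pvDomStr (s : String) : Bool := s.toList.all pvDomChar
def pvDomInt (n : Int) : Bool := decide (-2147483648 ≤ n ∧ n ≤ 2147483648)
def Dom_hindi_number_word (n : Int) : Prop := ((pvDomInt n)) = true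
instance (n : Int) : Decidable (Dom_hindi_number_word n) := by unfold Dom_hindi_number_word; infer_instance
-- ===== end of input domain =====

-- B replaces A's self-recursive dict-driven formatter by a flat place-value builder whose
-- 1-99 table is a 0-indexed list split off one space-separated string; equivalence is
-- proved for all n ≥ 0 (Pre_); return value only, no side effects.


set_option maxRecDepth 100000

-- ===== PORT A =====
-- A's local 1..99 dict literal
def hindiWords : PySem.Dict Int String := PySem.Dict.mk [
  (1, "ek"), (2, "do"), (3, "teen"), (4, "char"), (5, "paanch"),
  (6, "chhah"), (7, "saat"), (8, "aath"), (9, "nau"), (10, "das"),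
  (11, "gyarah"), (12, "barah"), (13, "terah"), (14, "chaudah"), (15, "pandrah"),
  (16, "solah"), (17, "satrah"), (18, "athaarah"), (19, "unnis"), (20, "bees"),
  (21, "ikkis"), (22, "baais"), (23, "teis"), (24, "chaubis"), (25, "pachchis"),
  (26, "chhabbis"), (27, "sattais"), (28, "atthaais"), (29, "untis"), (30, "tees"),
  (31, "ikatees"), (32, "battis"), (33, "tentis"), (34, "chautis"), (35, "paintis"),
  (36, "chhattis"), (37, "saintis"), (38, "adtis"), (39, "untalis"), (40, "chalis"),
  (41, "iktalis"), (42, "bayalis"), (43, "tentalis"), (44, "chavalis"), (45, "paintalis"),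
  (46, "chhiyalis"), (47, "saintalis"), (48, "adtalis"), (49, "unchaas"), (50, "pachaas"),
  (51, "ikyavan"), (52, "baavan"), (53, "tirpan"), (54, "chauvan"), (55, "pachpan"),
  (56, "chhappan"), (57, "sattavan"), (58, "athavan"), (59, "unsath"), (60, "saath"),
  (61, "iksath"), (62, "basath"), (63, "tirsath"), (64, "chausath"), (65, "painsath"),
  (66, "chhiyasath"), (67, "sarsath"), (68, "adsath"), (69, "unhattar"), (70, "sattar"),
  (71, "ikattar"), (72, "bahattar"), (73, "tihattar"), (74, "chauhattar"), (75, "pachattar"),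
  (76, "chhihattar"), (77, "satattar"), (78, "athhattar"), (79, "unasi"), (80, "assi"),
  (81, "ikasi"), (82, "bayasi"), (83, "tirasi"), (84, "chaurasi"), (85, "pachaasi"),
  (86, "chhiyasi"), (87, "sattasi"), (88, "athasi"), (89, "navasi"), (90, "nabbe"),
  (91, "ikyaanave"), (92, "baanave"), (93, "tiranave"), (94, "chauranave"), (95, "pachanave"),
  (96, "chhiyanave"), (97, "sattanave"), (98, "atthanave"), (99, "ninyanave")]

-- fuel makes the recursion total; depth is ≤ 3 on every Int (recursive calls hit the
-- n % 100 ∈ 0..99 / n // 1000 ∈ 2..99 / n % 1000 ∈ 1..999 cases), so fuel 3 is exact.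
def hindiGo : Nat → Int → String
  | 0, _ => ""
  | Nat.succ f, n =>
    if n = 0 then "shunya"
    else
      match PySem.Dict.get? hindiWords n with
      | some w => w
      | none =>
        if n < 1000 then
          if n = 100 then "sau"
          else
            let pfx :=
              (PySem.Dict.getD hindiWords (PySem.Int.floordiv n 100)
                (PySem.Int.toStr (PySem.Int.floordiv n 100))) ++ " sau"
            pfx ++ (if PySem.Int.mod n 100 ≠ 0 then " " ++ hindiGo f (PySem.Int.mod n 100) else "")
        else if n < 100000 then
          let pfx :=
            if PySem.Int.floordiv n 1000 = 1 then "hazaar"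
            else hindiGo f (PySem.Int.floordiv n 1000) ++ " hazaar"
          pfx ++ (if PySem.Int.mod n 1000 ≠ 0 then " " ++ hindiGo f (PySem.Int.mod n 1000) else "")
        else PySem.Int.toStr n

def hindi_number_word (n : Int) : String := hindiGo 3 n

-- ===== PORT B =====
-- B's table: one space-separated string, split (Python adjacent string literals concatenate)
def wordsStr : String := "ek do teen char paanch chhah saat aath nau das gyarah barah terah chaudah pandrah solah satrah athaarah unnis bees ikkis baais teis chaubis pachchis chhabbis sattais atthaais untis tees ikatees battis tentis chautis paintis chhattis saintis adtis untalis chalis iktalis bayalis tentalis chavalis paintalis chhiyalis saintalis adtalis unchaas pachaas ikyavan baavan tirpan chauvan pachpan chhappan sattavan athavan unsath saath iksath basath tirsath chausath painsath chhiyasath sarsath adsath unhattar sattar ikattar bahattar tihattar chauhattar pachattar chhihattar satattar athhattar unasi assi ikasi bayasi tirasi chaurasi pachaasi chhiyasi sattasi athasi navasi nabbe ikyaanave baanave tiranave chauranave pachanave chhiyanave sattanave atthanave ninyanave"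

def wordList : List String := PySem.Str.split₀ wordsStr

-- _WORDS[k-1]; the index is always in range for 1 ≤ k ≤ 99, so the getD default is unreached
def wB (k : Int) : String := (PySem.List.pyGet? wordList (k - 1)).getD ""

def subThousandB (g : Int) : String :=
  if g = 100 then "sau"
  else
    let hundreds := PySem.Int.floordiv g 100
    let tail := PySem.Int.mod g 100
    let parts :=
      (if hundreds ≠ 0 then [wB hundreds ++ " sau"] else []) ++
      (if tail ≠ 0 then [wB tail] else [])
    PySem.Str.join " " parts

def hindi_number_word_alt (n : Int) : String :=
  if n = 0 then "shunya"
  else if n < 0 ∨ 100000 ≤ n then PySem.Int.toStr n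
  else
    let thousands := PySem.Int.floordiv n 1000
    let rest := PySem.Int.mod n 1000
    let parts :=
      (if thousands ≠ 0 then
        [if thousands = 1 then "hazaar" else wB thousands ++ " hazaar"]
       else []) ++
      (if rest ≠ 0 then [subThousandB rest] else [])
    PySem.Str.join " " parts

-- ===== PRECONDITION & SPEC =====
-- Pre_ excludes negative inputs, which lie outside the natural domain of number-to-words:
-- there A's n<1000 branch words the floored quotient ("-1 sau ...") while B returns str(n).
def Pre_hindi_number_word (n : Int) : Prop := 0 ≤ n
instance (n : Int) : Decidable (Pre_hindi_number_word n) := by unfold Pre_hindi_number_word; infer_instance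
def pvWitness_hindi_number_word : Int := (2100)
def Spec_hindi_number_word (n : Int) (out : String) : Prop := out = hindi_number_word_alt n
instance (n : Int) (out : String) : Decidable (Spec_hindi_number_word n out) := by unfold Spec_hindi_number_word; infer_instance

-- ===== CLAIM (what is proved, stated in full; the proofs are below) =====
def Claim_equal_hindi_number_word : Prop := ∀ (n : Int), Dom_hindi_number_word n → Pre_hindi_number_word n → Spec_hindi_number_word n (hindi_number_word n)

-- ===== LEMMAS AND PROOFS =====

theorem keys_small : ∀ k ∈ hindiWords.keys, k ≤ (99 : Int) := by decide

theorem get?_big {n : Int} (h : 100 ≤ n) : PySem.Dict.get? hindiWords n = none := by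
  rw [PySem.Dict.get?_eq_none_iff_not_mem_keys]
  intro hmem
  have := keys_small n hmem
  omega

theorem isSome99 : ∀ m : Nat, m < 99 → (PySem.Dict.get? hindiWords ((m : Int) + 1)).isSome = true := by
  decide

-- bridge between the two tables: B's indexed lookup agrees with A's dict on 1..99
set_option maxHeartbeats 4000000 in
theorem tables_agree : ∀ m : Nat, m < 99 →
    wB ((m : Int) + 1) = PySem.Dict.getD hindiWords ((m : Int) + 1) "" := by
  decide

theorem wB_eq {t : Int} (h1 : 1 ≤ t) (h2 : t ≤ 99) {d : String} :
    wB t = PySem.Dict.getD hindiWords t d := by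
  obtain ⟨m, hm, rfl⟩ : ∃ m : Nat, m < 99 ∧ (m : Int) + 1 = t := ⟨(t - 1).toNat, by omega, by omega⟩
  obtain ⟨w, hw⟩ := Option.isSome_iff_exists.mp (isSome99 m hm)
  rw [tables_agree m hm]
  simp only [PySem.Dict.getD_eq_get?_getD, hw, Option.getD_some]

theorem join_pair (a b : String) : PySem.Str.join " " [a, b] = a ++ " " ++ b := by
  have h2 : (PySem.Str.join " " [a, b]).toList = (a ++ " " ++ b).toList := by
    simp [PySem.Str.join, PySem.Chars.join_cons_cons, PySem.Chars.join_singleton]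
  exact String.toList_inj.mp h2

theorem str_merge (l x : String) : l ++ (" " ++ x) = (l ++ " ") ++ x := by
  apply String.toList_inj.mp
  simp

theorem join_one (a : String) : PySem.Str.join " " [a] = a := by
  have h2 : (PySem.Str.join " " [a]).toList = a.toList := by
    simp [PySem.Str.join, PySem.Chars.join_singleton]
  exact String.toList_inj.mp h2

-- A's rendering of 1..99 at any sufficient fuel is B's table lookup
theorem small_eq (f : Nat) {t : Int} (h1 : 1 ≤ t) (h2 : t ≤ 99) :
    hindiGo (f + 1) t = wB t := by
  obtain ⟨m, hm, rfl⟩ : ∃ m : Nat, m < 99 ∧ (m : Int) + 1 = t := ⟨(t - 1).toNat, by omega, by omega⟩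
  obtain ⟨w, hw⟩ := Option.isSome_iff_exists.mp (isSome99 m hm)
  rw [tables_agree m hm]
  show hindiGo (f + 1) _ = _
  unfold hindiGo
  rw [if_neg (by omega : ¬ ((m : Int) + 1 = 0)), hw]
  simp only [PySem.Dict.getD_eq_get?_getD, hw, Option.getD_some]

-- A's recursive rendering of a sub-thousand group 1..999 is B's helper, at any sufficient fuel
theorem sub_lemma (f : Nat) {g : Int} (h1 : 1 ≤ g) (h2 : g ≤ 999) :
    hindiGo (f + 2) g = subThousandB g := by
  have hq : PySem.Int.floordiv g 100 = g / 100 := PySem.Int.floordiv_eq_ediv_of_pos (by omega)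
  have hr : PySem.Int.mod g 100 = g % 100 := PySem.Int.mod_eq_emod_of_pos (by omega)
  by_cases hsm : g ≤ 99
  · -- dict hit on the A side; bare tens/units fragment on the B side
    rw [small_eq (f + 1) h1 hsm]
    unfold subThousandB
    rw [if_neg (by omega : ¬ (g = 100))]
    simp only [hq, hr]
    rw [if_neg (by omega : ¬ (g / 100 ≠ 0)), if_pos (by omega : g % 100 ≠ 0)]
    rw [show g % 100 = g by omega, List.nil_append, join_one]
  · -- 100 ≤ g ≤ 999
    unfold hindiGo subThousandB
    rw [if_neg (by omega : ¬ (g = 0)), get?_big (by omega)]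
    simp only [hq, hr]
    rw [if_pos (by omega : g < 1000)]
    by_cases h100 : g = 100
    · rw [if_pos h100, if_pos h100]
    · rw [if_neg h100, if_neg h100]
      rw [if_pos (by omega : g / 100 ≠ 0)]
      rw [← wB_eq (by omega : (1:Int) ≤ g / 100) (by omega)]
      by_cases ht : g % 100 = 0
      · rw [if_neg (by omega : ¬ (g % 100 ≠ 0)), if_neg (by omega : ¬ (g % 100 ≠ 0))]
        rw [List.append_nil, join_one]
        simp
      · rw [if_pos (by omega : g % 100 ≠ 0), if_pos (by omega : g % 100 ≠ 0)]
        rw [List.singleton_append, join_pair, small_eq f (by omega : (1:Int) ≤ g % 100) (by omega)]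
        rw [str_merge]

-- top level, 1 ≤ n ≤ 999: B reduces to the single sub-thousand fragment
theorem agree_small {n : Int} (h1 : 1 ≤ n) (h2 : n ≤ 999) :
    hindiGo 3 n = hindi_number_word_alt n := by
  have hq : PySem.Int.floordiv n 1000 = n / 1000 := PySem.Int.floordiv_eq_ediv_of_pos (by omega)
  have hr : PySem.Int.mod n 1000 = n % 1000 := PySem.Int.mod_eq_emod_of_pos (by omega)
  rw [sub_lemma 1 h1 h2]
  unfold hindi_number_word_alt
  rw [if_neg (by omega : ¬ (n = 0)), if_neg (by omega : ¬ (n < 0 ∨ 100000 ≤ n))]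
  simp only [hq, hr]
  rw [if_neg (by omega : ¬ (n / 1000 ≠ 0)), if_pos (by omega : n % 1000 ≠ 0)]
  rw [show n % 1000 = n by omega, List.nil_append, join_one]

-- ===== VERDICT (by name: the statement is the Claim_ definition above) =====
theorem hindi_number_word_spec : Claim_equal_hindi_number_word := by
  intro n _ hpre
  unfold Spec_hindi_number_word hindi_number_word
  have hpre : 0 ≤ n := hpre
  by_cases h0 : n = 0
  · subst h0; rfl
  · by_cases hsm : n ≤ 999
    · exact agree_small (by omega) hsm
    · -- n ≥ 1000
      have hq : PySem.Int.floordiv n 1000 = n / 1000 := PySem.Int.floordiv_eq_ediv_of_pos (by omega)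
      have hr : PySem.Int.mod n 1000 = n % 1000 := PySem.Int.mod_eq_emod_of_pos (by omega)
      by_cases hbig : 100000 ≤ n
      · -- fall-through: both return str(n)
        show hindiGo 3 n = hindi_number_word_alt n
        unfold hindiGo hindi_number_word_alt
        rw [get?_big (by omega), if_neg h0, if_neg h0, if_pos (by omega : n < 0 ∨ 100000 ≤ n)]
        rw [if_neg (by omega : ¬ (n < 1000)), if_neg (by omega : ¬ (n < 100000))]
      · -- 1000 ≤ n ≤ 99999
        show hindiGo 3 n = hindi_number_word_alt n
        unfold hindiGo hindi_number_word_alt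
        rw [get?_big (by omega), if_neg h0, if_neg h0,
            if_neg (by omega : ¬ (n < 0 ∨ 100000 ≤ n)),
            if_neg (by omega : ¬ (n < 1000)), if_pos (by omega : n < 100000)]
        simp only [hq, hr]
        rw [if_pos (by omega : n / 1000 ≠ 0)]
        have hq1 : 1 ≤ n / 1000 := by omega
        have hq99 : n / 1000 ≤ 99 := by omega
        by_cases hrz : n % 1000 = 0
        · rw [if_neg (by omega : ¬ (n % 1000 ≠ 0)), if_neg (by omega : ¬ (n % 1000 ≠ 0)),
              List.append_nil, join_one]
          by_cases hq1' : n / 1000 = 1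
          · rw [if_pos hq1', if_pos hq1']
            simp
          · rw [if_neg hq1', if_neg hq1', small_eq 1 (by omega) hq99]
            simp
        · rw [if_pos (by omega : n % 1000 ≠ 0), if_pos (by omega : n % 1000 ≠ 0),
              List.singleton_append, join_pair,
              sub_lemma 0 (by omega : (1:Int) ≤ n % 1000) (by omega), str_merge]
          by_cases hq1' : n / 1000 = 1
          · rw [if_pos hq1', if_pos hq1']
          · rw [if_neg hq1', if_neg hq1', small_eq 1 (by omega) hq99]
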